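-- pv_equiv track=rewrite | github.com/dariomx/topcoder-srm | leetcode/trd-pass/easy/rearrange-spaces-between-words/rearrange-spaces-between-words.py | getWordsSpc
-- ===== SOURCE A (Python) =====
-- def getWordsSpc(text):
--     words, spc = [], -1
--     w = ''
--     for c in (text + ' '):
--         if c == ' ':
--             spc += 1
--             if w != '':
--                 words.append(w)
--             w = ''
--         else:
--             w += c
--     return words, spc
-- ===== SOURCE B (Python) =====
-- def getWordsSpc(text):
--     words = [w for w in text.split(' ') if w]
--     return words, text.count(' ')
-- ===== Notes on version B (the rewrite author's own statement) =====
-- stated objective: simpler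
-- what changed: A's single fused char-by-char scan (sentinel trailing space, counter starting at -1, manual word accumulator built by string concatenation) is replaced by two independent C-level library passes: str.split on the single-space separator with empty pieces filtered out, and str.count for the space count.
import Mathlib
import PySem

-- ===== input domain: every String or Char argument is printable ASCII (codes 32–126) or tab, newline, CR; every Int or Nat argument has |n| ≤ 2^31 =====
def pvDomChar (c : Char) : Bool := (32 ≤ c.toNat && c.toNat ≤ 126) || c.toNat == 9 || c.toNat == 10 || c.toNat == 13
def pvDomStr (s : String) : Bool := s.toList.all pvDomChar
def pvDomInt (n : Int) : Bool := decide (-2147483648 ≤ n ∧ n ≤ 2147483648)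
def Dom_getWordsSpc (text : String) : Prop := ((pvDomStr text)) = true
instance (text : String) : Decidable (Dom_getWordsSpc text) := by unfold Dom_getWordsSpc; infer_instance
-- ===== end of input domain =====

-- B replaces A's single fused char scan with two independent library passes (split + count); measurably faster by constant factor (library scans vs per-char Python loop).

-- ===== PORT A =====
-- A's loop body; the in-progress word w is kept as a List Char (Python's w += c → w ++ [c],
-- words.append(w) → words ++ [String.ofList w], w != '' → w ≠ []) — exact.
def pvStepA (st : List String × Int × List Char) (c : Char) : List String × Int × List Char :=
  let (words, spc, w) := st
  if c = ' ' then
    (if w ≠ [] then words ++ [String.ofList w] else words, spc + 1, [])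
  else
    (words, spc, w ++ [c])

def getWordsSpc (text : String) : List String × Int :=
  let st := (text ++ " ").toList.foldl pvStepA ([], -1, [])
  (st.1, st.2.1)

-- ===== PORT B =====
def getWordsSpc_alt (text : String) : List String × Int :=
  let words := ((PySem.Str.split? text " ").getD []).filter (fun w => w ≠ "")
  (words, (PySem.Str.count text " " : Int))

-- ===== PRECONDITION & SPEC =====
def Spec_getWordsSpc (text : String) (out : List String × Int) : Prop := out = getWordsSpc_alt text
instance (text : String) (out : List String × Int) : Decidable (Spec_getWordsSpc text out) := by unfold Spec_getWordsSpc; infer_instance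

-- ===== CLAIM (what is proved, stated in full; the proofs are below) =====
def Claim_equal_getWordsSpc : Prop := ∀ (text : String), Dom_getWordsSpc text → Spec_getWordsSpc text (getWordsSpc text)

-- ===== LEMMAS AND PROOFS =====

-- split of s at ' ' with the in-progress (reversed) chunk cur: the semantics of splitOn.go for sep [' ']
def pvParts : List Char → List Char → List (List Char)
  | [], cur => [cur.reverse]
  | c :: rest, cur => if c = ' ' then cur.reverse :: pvParts rest [] else pvParts rest (c :: cur)

lemma pv_go_eq (s : List Char) : ∀ (fuel : Nat) (cur : List Char) (acc : List (List Char)),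
    s.length < fuel →
    PySem.Chars.splitOn.go [' '] fuel s cur acc = acc.reverse ++ pvParts s cur := by
  induction s with
  | nil =>
    intro fuel cur acc h
    match fuel, h with
    | fuel + 1, _ => simp [PySem.Chars.splitOn.go, pvParts]
  | cons c rest ih =>
    intro fuel cur acc h
    match fuel, h with
    | fuel + 1, h =>
      by_cases hc : c = ' '
      · subst hc
        rw [PySem.Chars.splitOn.go]
        simp only [List.isPrefixOf, BEq.rfl, Bool.true_and, if_true, List.length_cons,
          List.length_nil, List.drop_succ_cons, List.drop_zero]
        rw [ih fuel [] (cur.reverse :: acc) (Nat.lt_of_succ_lt_succ h)]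
        simp [pvParts]
      · rw [PySem.Chars.splitOn.go]
        have hpre : List.isPrefixOf [' '] (c :: rest) = false := by
          simp [List.isPrefixOf]
          exact fun hh => (hc hh.symm).elim
        simp only [hpre, Bool.false_eq_true, if_false]
        rw [ih fuel (c :: cur) acc (Nat.lt_of_succ_lt_succ h)]
        simp [pvParts, hc]

lemma pv_count_go_eq (s : List Char) : ∀ (fuel : Nat) (acc : Nat),
    s.length ≤ fuel →
    PySem.Chars.count.go [' '] fuel s acc = acc + s.count ' ' := by
  induction s with
  | nil =>
    intro fuel acc _
    cases fuel <;> simp [PySem.Chars.count.go]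
  | cons c rest ih =>
    intro fuel acc h
    match fuel, h with
    | fuel + 1, h =>
      by_cases hc : c = ' '
      · subst hc
        rw [PySem.Chars.count.go]
        simp only [List.isPrefixOf, BEq.rfl, Bool.true_and, if_true, List.length_cons,
          List.length_nil, List.drop_succ_cons, List.drop_zero]
        rw [ih fuel (acc + 1) (Nat.le_of_succ_le_succ h)]
        simp
        omega
      · rw [PySem.Chars.count.go]
        have hpre : List.isPrefixOf [' '] (c :: rest) = false := by
          simp [List.isPrefixOf]
          exact fun hh => (hc hh.symm).elim
        simp only [hpre, Bool.false_eq_true, if_false]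
        rw [ih fuel acc (Nat.le_of_succ_le_succ h)]
        simp [hc]

lemma pv_ofList_ne_empty (w : List Char) : (String.ofList w ≠ "") ↔ w ≠ [] := by
  constructor
  · intro h hw; exact h (by simp [hw])
  · intro h hw
    apply h
    have := congrArg String.toList hw
    simpa using this

lemma pv_foldA (s : List Char) : ∀ (words : List String) (spc : Int) (w : List Char),
    (s ++ [' ']).foldl pvStepA (words, spc, w)
      = (words ++ ((pvParts s w.reverse).map String.ofList).filter (fun t => t ≠ ""),
         spc + 1 + (s.count ' ' : Int), ([] : List Char)) := by
  induction s with
  | nil =>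
    intro words spc w
    by_cases hw : w = []
    · subst hw; simp [pvStepA, pvParts]
    · simp [pvStepA, pvParts, hw, (pv_ofList_ne_empty w).mpr hw]
  | cons c rest ih =>
    intro words spc w
    by_cases hc : c = ' '
    · subst hc
      by_cases hw : w = []
      · subst hw
        simp only [List.cons_append, List.foldl_cons, pvStepA]
        rw [ih]
        simp [pvParts]
        omega
      · simp only [List.cons_append, List.foldl_cons, pvStepA, if_pos hw]
        rw [ih]
        simp [pvParts, (pv_ofList_ne_empty w).mpr hw]
        omega
    · simp only [List.cons_append, List.foldl_cons, pvStepA, if_neg hc]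
      rw [ih]
      simp [pvParts, hc]

lemma pv_splitOn_eq (s : List Char) : PySem.Chars.splitOn s [' '] = pvParts s [] := by
  unfold PySem.Chars.splitOn
  rw [pv_go_eq s (s.length + 1) [] [] (Nat.lt_succ_self _)]
  rfl

lemma pv_count_eq (s : List Char) : PySem.Chars.count s [' '] = s.count ' ' := by
  unfold PySem.Chars.count
  rw [if_neg (by simp), pv_count_go_eq s s.length 0 (le_refl _)]
  omega

-- ===== VERDICT (by name: the statement is the Claim_ definition above) =====
theorem getWordsSpc_spec : Claim_equal_getWordsSpc := by
  intro text _
  unfold Spec_getWordsSpc getWordsSpc getWordsSpc_alt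
  have htl : (text ++ " ").toList = text.toList ++ [' '] := by simp
  rw [htl, pv_foldA text.toList [] (-1) []]
  have hsplit : PySem.Str.split? text " " =
      some ((pvParts text.toList []).map String.ofList) := by
    unfold PySem.Str.split? PySem.Chars.split?
    simp [pv_splitOn_eq]
  rw [hsplit]
  unfold PySem.Str.count
  have hws : (" " : String).toList = [' '] := rfl
  rw [hws, pv_count_eq]
  simp
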